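-- pv_equiv track=rewrite | github.com/Rami1x/Networking-IP-Subnet-Calc-Shell-Tool | main.py | check
-- ===== SOURCE A (Python) =====
-- def check(ipOne, ipTwo):
--     illegal = 0
--     forbidden = ["1", "2", "3", "4", "5", "6", "7", "8", "9", "0", "."]
--     i = 0
--     result = True
--
--     while i < len(ipOne):
--         if ipOne[i] in forbidden:
--             i += 1
--         else:
--             illegal += 1
--             i += 1
--     i = 0
--
--     while i < len(ipTwo):
--         if ipTwo[i] in forbidden:
--             i += 1
--         else:
--             illegal += 1
--             i += 1
--
--     match illegal:
--         case 0:
--             result = True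
--         case _:
--             result = False
--
--     return result
-- ===== SOURCE B (Python) =====
-- def check(ipOne, ipTwo):
--     allowed = {"1", "2", "3", "4", "5", "6", "7", "8", "9", "0", "."}
--     return (set(ipOne) | set(ipTwo)) <= allowed
-- ===== Notes on version B (the rewrite author's own statement) =====
-- stated objective: simpler
-- what changed: Replaces the two index-walking while-loops and the illegal counter with building the deduplicated set of characters of both strings and testing a single subset relation against the allowed set.
import Mathlib
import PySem

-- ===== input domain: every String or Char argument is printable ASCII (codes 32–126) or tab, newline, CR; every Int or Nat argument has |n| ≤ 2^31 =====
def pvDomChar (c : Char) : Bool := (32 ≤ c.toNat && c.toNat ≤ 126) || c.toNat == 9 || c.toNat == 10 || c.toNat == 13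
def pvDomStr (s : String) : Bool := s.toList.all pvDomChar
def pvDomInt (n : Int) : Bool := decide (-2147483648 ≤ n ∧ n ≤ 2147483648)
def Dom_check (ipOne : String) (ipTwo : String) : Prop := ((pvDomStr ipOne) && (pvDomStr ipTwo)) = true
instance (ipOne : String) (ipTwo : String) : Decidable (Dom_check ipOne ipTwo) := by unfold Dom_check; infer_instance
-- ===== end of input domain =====

-- B replaces A's two index-walking while-loops and illegal counter by a single
-- subset test of the deduplicated character set against the allowed set (simpler).

-- ===== PORT A =====
-- the forbidden list of A (one-character strings in Python, ported as chars)
def checkForbidden : List Char := ['1', '2', '3', '4', '5', '6', '7', '8', '9', '0', '.']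

-- one while-loop of A: walks the string, incrementing illegal for chars not in forbidden
def checkLoop (s : List Char) (illegal : Nat) : Nat :=
  s.foldl (fun ill c => if c ∈ checkForbidden then ill else ill + 1) illegal

def check (ipOne : String) (ipTwo : String) : Bool :=
  let illegal := checkLoop ipOne.toList 0
  let illegal := checkLoop ipTwo.toList illegal
  match illegal with
  | 0 => true
  | _ => false

-- ===== PORT B =====
def checkAllowed : PySem.Set Char :=
  PySem.Set.ofList ['1', '2', '3', '4', '5', '6', '7', '8', '9', '0', '.']

def check_alt (ipOne : String) (ipTwo : String) : Bool :=
  PySem.Set.issubset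
    (PySem.Set.union (PySem.Set.ofList ipOne.toList) (PySem.Set.ofList ipTwo.toList))
    checkAllowed

-- ===== PRECONDITION & SPEC =====
def Spec_check (ipOne : String) (ipTwo : String) (out : Bool) : Prop := out = check_alt ipOne ipTwo
instance (ipOne : String) (ipTwo : String) (out : Bool) : Decidable (Spec_check ipOne ipTwo out) := by unfold Spec_check; infer_instance

-- ===== CLAIM (what is proved, stated in full; the proofs are below) =====
def Claim_equal_check : Prop := ∀ (ipOne : String) (ipTwo : String), Dom_check ipOne ipTwo → Spec_check ipOne ipTwo (check ipOne ipTwo)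

-- ===== LEMMAS AND PROOFS =====
lemma checkLoop_eq_add_countP (s : List Char) (illegal : Nat) :
    checkLoop s illegal = illegal + s.countP (fun c => !decide (c ∈ checkForbidden)) := by
  induction s generalizing illegal with
  | nil => simp [checkLoop]
  | cons c s ih =>
    simp only [checkLoop, List.foldl_cons, List.countP_cons] at *
    by_cases h : c ∈ checkForbidden <;> simp [h, ih] <;> omega

lemma match_nat_eq_true_iff (n : Nat) :
    (match n with | 0 => true | _ => false) = true ↔ n = 0 := by
  cases n <;> simp

lemma check_eq_true_iff (a b : String) :
    check a b = true ↔ (∀ c ∈ a.toList, c ∈ checkForbidden) ∧ (∀ c ∈ b.toList, c ∈ checkForbidden) := by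
  simp only [check, checkLoop_eq_add_countP, Nat.zero_add]
  rw [match_nat_eq_true_iff, Nat.add_eq_zero, List.countP_eq_zero, List.countP_eq_zero]
  simp

lemma check_alt_eq_true_iff (a b : String) :
    check_alt a b = true ↔ (∀ c ∈ a.toList, c ∈ checkForbidden) ∧ (∀ c ∈ b.toList, c ∈ checkForbidden) := by
  unfold check_alt
  rw [PySem.Set.issubset_iff]
  constructor
  · intro h
    refine ⟨fun c hc => ?_, fun c hc => ?_⟩
    all_goals {
      have hm : c ∈ PySem.Set.union (PySem.Set.ofList a.toList) (PySem.Set.ofList b.toList) := by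
        rw [PySem.Set.mem_union]
        simp [PySem.Set.mem_ofList, hc]
      have := h c hm
      simpa [checkAllowed, checkForbidden, PySem.Set.mem_ofList] using this
    }
  · intro ⟨ha, hb⟩ c hc
    rw [PySem.Set.mem_union] at hc
    simp only [PySem.Set.mem_ofList] at hc
    have : c ∈ checkForbidden := hc.elim (ha c) (hb c)
    simpa [checkAllowed, checkForbidden, PySem.Set.mem_ofList] using this

-- ===== VERDICT (by name: the statement is the Claim_ definition above) =====
theorem check_spec : Claim_equal_check := by
  intro a b _
  unfold Spec_check
  rw [Bool.eq_iff_iff, check_eq_true_iff, check_alt_eq_true_iff]
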